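-- pv_equiv track=rewrite | github.com/aaronshin43/DailyMenu | services/email_templates.py | _build_card_table
-- ===== SOURCE A (Python) =====
-- from typing import Dict, List, Any
--
-- def _chunk_list(items: List[Dict[str, Any]], size: int) -> List[List[Dict[str, Any]]]:
--     return [items[index:index + size] for index in range(0, len(items), size)]
--
-- def _build_card_table(items: List[Dict[str, Any]]) -> str:
--     rows_html = []
--
--     for row in _chunk_list(items, 3):
--         cells = []
--         for item in row:
--             cells.append(
--                 f"""
--                 <td valign="top" width="33.33%" style="padding: 5px;">
--                     <table role="presentation" width="100%" cellpadding="0" cellspacing="0" style="border: 1px solid #ece0d2; border-radius: 12px; background: #fffdfa;">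
--                         <tr>
--                             <td style="padding: 10px 12px; font-size: 15px; line-height: 1.32; color: #231815; font-weight: 600;">
--                                 {item["name"]}
--                             </td>
--                         </tr>
--                     </table>
--                 </td>
--                 """
--             )
--
--         while len(cells) < 3:
--             cells.append('<td valign="top" width="33.33%" style="padding: 6px;"></td>')
--
--         rows_html.append(f"<tr>{''.join(cells)}</tr>")
--
--     return f'<table role="presentation" width="100%" cellpadding="0" cellspacing="0">{"".join(rows_html)}</table>'
-- ===== SOURCE B (Python) =====
-- PAD = '<td valign="top" width="33.33%" style="padding: 6px;"></td>'
-- CELL_PRE = '\n                <td valign="top" width="33.33%" style="padding: 5px;">\n                    <table role="presentation" width="100%" cellpadding="0" cellspacing="0" style="border: 1px solid #ece0d2; border-radius: 12px; background: #fffdfa;">\n                        <tr>\n                            <td style="padding: 10px 12px; font-size: 15px; line-height: 1.32; color: #231815; font-weight: 600;">\n                                '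
-- CELL_SUF = '\n                            </td>\n                        </tr>\n                    </table>\n                </td>\n                '
--
-- def _build_card_table(items):
--     rows_html = []
--     cells = []
--     for item in items:
--         cells.append(CELL_PRE + item["name"] + CELL_SUF)
--         if len(cells) == 3:
--             rows_html.append("<tr>" + "".join(cells) + "</tr>")
--             cells = []
--     if cells:
--         cells.extend([PAD] * (3 - len(cells)))
--         rows_html.append("<tr>" + "".join(cells) + "</tr>")
--     return '<table role="presentation" width="100%" cellpadding="0" cellspacing="0">' + "".join(rows_html) + "</table>"
-- ===== Notes on version B (the rewrite author's own statement) =====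
-- stated objective: simpler
-- what changed: B drops the _chunk_list helper and its intermediate list-of-lists of slices, doing one linear pass over items with a 3-cell buffer that is flushed into rows_html whenever it fills, plus a final padded flush.
import Mathlib
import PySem

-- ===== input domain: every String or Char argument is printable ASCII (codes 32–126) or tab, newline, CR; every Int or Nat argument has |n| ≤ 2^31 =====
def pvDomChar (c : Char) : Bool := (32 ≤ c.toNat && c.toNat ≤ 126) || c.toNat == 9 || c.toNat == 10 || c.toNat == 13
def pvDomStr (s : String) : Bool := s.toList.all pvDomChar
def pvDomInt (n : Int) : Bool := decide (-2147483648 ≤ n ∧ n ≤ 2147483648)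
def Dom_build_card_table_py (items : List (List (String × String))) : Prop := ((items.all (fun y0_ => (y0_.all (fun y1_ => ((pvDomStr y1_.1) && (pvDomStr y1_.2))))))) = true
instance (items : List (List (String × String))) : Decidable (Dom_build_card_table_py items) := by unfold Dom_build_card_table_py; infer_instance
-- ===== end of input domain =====

-- B replaces A's chunk-into-list-of-lists pass by a single fold over the items with a cell buffer
-- flushed every third item (objective: simpler one-pass decomposition; same output).

-- shared string literals (verbatim from the Python source's f-strings, identical in A and B)
def pvCellPre : String := "\n                <td valign=\"top\" width=\"33.33%\" style=\"padding: 5px;\">\n                    <table role=\"presentation\" width=\"100%\" cellpadding=\"0\" cellspacing=\"0\" style=\"border: 1px solid #ece0d2; border-radius: 12px; background: #fffdfa;\">\n                        <tr>\n                            <td style=\"padding: 10px 12px; font-size: 15px; line-height: 1.32; color: #231815; font-weight: 600;\">\n                                "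
def pvCellSuf : String := "\n                            </td>\n                        </tr>\n                    </table>\n                </td>\n                "
def pvPadCell : String := "<td valign=\"top\" width=\"33.33%\" style=\"padding: 6px;\"></td>"
def pvTablePre : String := "<table role=\"presentation\" width=\"100%\" cellpadding=\"0\" cellspacing=\"0\">"

-- the HTML cell both Pythons build for one item (item["name"]: total via getD; Pre_ requires the key)
def pvCellOf (item : List (String × String)) : String :=
  pvCellPre ++ (PySem.Dict.ofList item).getD "name" "" ++ pvCellSuf

-- ===== PORT A =====
-- _chunk_list(items, size): [items[index:index+size] for index in range(0, len(items), size)]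
def chunk_list_py (items : List (List (String × String))) (size : Int) :
    List (List (List (String × String))) :=
  (PySem.List.pyRange 0 (PySem.List.len items) size).map
    (fun index => PySem.List.slice items (some index) (some (index + size)))

-- the 'while len(cells) < 3: cells.append(...)' loop of A
def pvPadLoop (cells : List String) : List String :=
  if cells.length < 3 then pvPadLoop (cells ++ [pvPadCell]) else cells
termination_by 3 - cells.length
decreasing_by simp; omega

def build_card_table_py (items : List (List (String × String))) : String :=
  pvTablePre ++
    PySem.Str.join ""
      ((chunk_list_py items 3).foldl
        (fun rows row =>
          rows ++ ["<tr>" ++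
            PySem.Str.join "" (pvPadLoop (row.foldl (fun cs item => cs ++ [pvCellOf item]) [])) ++
            "</tr>"]) []) ++
    "</table>"

-- ===== PORT B =====
-- one step of B's single pass: append the cell, flush the row when the buffer reaches 3
def pvStep (s : List String × List String) (item : List (String × String)) :
    List String × List String :=
  let cells := s.2 ++ [pvCellOf item]
  if cells.length == 3 then
    (s.1 ++ ["<tr>" ++ PySem.Str.join "" cells ++ "</tr>"], [])
  else (s.1, cells)

-- flush of the leftover buffer after the pass (Source B's trailing 'if cells:' block), then the wrapper
def pvFinish (s : List String × List String) : List String :=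
  if s.2 = [] then s.1
  else s.1 ++ ["<tr>" ++ PySem.Str.join "" (s.2 ++ List.replicate (3 - s.2.length) pvPadCell) ++ "</tr>"]

def build_card_table_py_alt (items : List (List (String × String))) : String :=
  pvTablePre ++ PySem.Str.join "" (pvFinish (items.foldl pvStep ([], []))) ++ "</table>"

-- ===== PRECONDITION & SPEC =====
-- Pre_ excludes items lacking the key "name": there Python A raises KeyError (and B's port's getD "" is not claimed).
def Pre_build_card_table_py (items : List (List (String × String))) : Prop :=
  ∀ item ∈ items, (PySem.Dict.ofList item).contains "name" = true
instance (items : List (List (String × String))) : Decidable (Pre_build_card_table_py items) := by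
  unfold Pre_build_card_table_py; infer_instance

def pvWitness_build_card_table_py : (List (List (String × String))) :=
  [[("name", "Soup")], [("name", "Rice"), ("side", "Kimchi")], [("name", "Tea")], [("name", "Pie")]]

def Spec_build_card_table_py (items : List (List (String × String))) (out : String) : Prop := out = build_card_table_py_alt items
instance (items : List (List (String × String))) (out : String) : Decidable (Spec_build_card_table_py items out) := by unfold Spec_build_card_table_py; infer_instance

-- ===== CLAIM (what is proved, stated in full; the proofs are below) =====
def Claim_equal_build_card_table_py : Prop := ∀ (items : List (List (String × String))), Dom_build_card_table_py items → Pre_build_card_table_py items → Spec_build_card_table_py items (build_card_table_py items)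

-- ===== LEMMAS AND PROOFS =====

-- reference chunking: groups of 3, in order
def pvChunk3 (l : List (List (String × String))) : List (List (List (String × String))) :=
  if l = [] then [] else l.take 3 :: pvChunk3 (l.drop 3)
termination_by l.length
decreasing_by cases l with
  | nil => simp_all
  | cons a t => simp

-- the row string A produces from one chunk
def pvRowOf (row : List (List (String × String))) : String :=
  "<tr>" ++ PySem.Str.join "" (pvPadLoop (row.map pvCellOf)) ++ "</tr>"

theorem pvPadLoop_ge3 (cells : List String) (h : 3 ≤ cells.length) : pvPadLoop cells = cells := by
  unfold pvPadLoop; simp [Nat.not_lt.mpr h]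

theorem pvPadLoop_one (x : String) : pvPadLoop [x] = [x, pvPadCell, pvPadCell] := by
  unfold pvPadLoop; simp
  unfold pvPadLoop; simp
  unfold pvPadLoop; simp

theorem pvPadLoop_two (x y : String) : pvPadLoop [x, y] = [x, y, pvPadCell] := by
  unfold pvPadLoop; simp
  unfold pvPadLoop; simp

-- A's range/slice comprehension in closed form over Nat
theorem pvChunkA_closed (items : List (List (String × String))) :
    chunk_list_py items 3 =
      (List.range ((items.length + 2) / 3)).map (fun k => (items.drop (3 * k)).take 3) := by
  unfold chunk_list_py
  rw [PySem.List.pyRange_of_pos 0 (PySem.List.len items) (by norm_num)]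
  simp only [PySem.List.len_eq, List.map_map]
  have hcnt : (if (0:Int) < (items.length : Int) then (((items.length : Int) - 0 + 3 - 1) / 3).toNat else 0)
      = (items.length + 2) / 3 := by
    rcases Nat.eq_zero_or_pos items.length with h | h
    · simp [h]
    · rw [if_pos (by exact_mod_cast h)]
      omega
  rw [hcnt]
  refine List.map_congr_left (fun k _ => ?_)
  show PySem.List.slice items (some (0 + 3 * (k:Int))) (some (0 + 3 * (k:Int) + 3)) = _
  have h1 : (0 + 3 * (k:Int)) = ((3*k : Nat) : Int) := by push_cast; ring
  rw [h1]
  have h2 := PySem.List.slice_natCast_add items (3*k) 3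
  exact_mod_cast h2

-- the closed form is the recursive chunking
theorem pvChunkA_rec (items : List (List (String × String))) :
    (List.range ((items.length + 2) / 3)).map (fun k => (items.drop (3 * k)).take 3)
      = pvChunk3 items := by
  induction items using pvChunk3.induct with
  | case1 =>
    simp [pvChunk3]
  | case2 l hnil ih =>
    have hlen : 0 < l.length := List.length_pos_of_ne_nil hnil
    have h1 : (l.length + 2) / 3 = ((l.drop 3).length + 2) / 3 + 1 := by
      simp only [List.length_drop]; omega
    rw [pvChunk3, if_neg hnil, h1, List.range_succ_eq_map, List.map_cons, List.map_map, ← ih]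
    refine congrArg₂ List.cons (by simp) ?_
    refine List.map_congr_left (fun k _ => ?_)
    have h3 : 3 * (Nat.succ k) = 3 + 3 * k := by omega
    simp [Function.comp, h3, ← List.drop_drop]

-- B's fold, run from any accumulated rows with an empty buffer, appends exactly A's rows
theorem pvFold_aux : ∀ (n : Nat) (items : List (List (String × String))), items.length ≤ n →
    ∀ (rows : List String),
    pvFinish (items.foldl pvStep (rows, [])) = rows ++ (pvChunk3 items).map pvRowOf := by
  intro n
  induction n with
  | zero =>
    intro items hlen rows
    have : items = [] := List.eq_nil_of_length_eq_zero (Nat.le_zero.mp hlen)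
    subst this; simp [pvFinish, pvChunk3]
  | succ n ih =>
    intro items hlen rows
    match items with
    | [] => simp [pvFinish, pvChunk3]
    | [a] =>
      simp [pvStep, pvFinish, pvChunk3, pvRowOf, pvPadLoop_one, List.replicate]
    | [a, b] =>
      simp [pvStep, pvFinish, pvChunk3, pvRowOf, pvPadLoop_two]
    | a :: b :: c :: rest =>
      have hstep : (a :: b :: c :: rest).foldl pvStep (rows, []) =
          rest.foldl pvStep (rows ++ [pvRowOf [a, b, c]], []) := by
        simp [pvStep, pvRowOf, pvPadLoop_ge3]
      rw [hstep, ih rest (by simp at hlen; omega) (rows ++ [pvRowOf [a, b, c]])]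
      have hch : pvChunk3 (a :: b :: c :: rest) = [a, b, c] :: pvChunk3 rest := by
        rw [pvChunk3]; simp
      rw [hch]
      simp

theorem pvFold_eq (items : List (List (String × String))) : ∀ (rows : List String),
    pvFinish (items.foldl pvStep (rows, [])) = rows ++ (pvChunk3 items).map pvRowOf :=
  pvFold_aux items.length items (Nat.le_refl _)

-- ===== VERDICT (by name: the statement is the Claim_ definition above) =====
theorem build_card_table_py_spec : Claim_equal_build_card_table_py := by
  intro items _ _
  unfold Spec_build_card_table_py build_card_table_py build_card_table_py_alt
  rw [pvFold_eq items [], pvChunkA_closed, pvChunkA_rec, List.nil_append]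
  congr 2
  rw [PySem.List.foldl_append_singleton_eq_map, List.nil_append]
  congr 1
  refine List.map_congr_left (fun row _ => ?_)
  rw [PySem.List.foldl_append_singleton_eq_map, List.nil_append, pvRowOf]
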